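-- pv_equiv track=rewrite | github.com/doveva/Parser_project | lib/parser.py | parse_keyword_DATE_line
-- ===== SOURCE A (Python) =====
-- def parse_keyword_DATE_line(current_date_line: str):
--     char_set = set("!@#%&()[]{}/?<>'")
--     output_string = ""
--     for i in range(0, len(current_date_line)):
--         if not current_date_line[i] in char_set:
--             output_string += current_date_line[i]
--     parse_data = " ".join(output_string.split())
--     return parse_data
-- ===== SOURCE B (Python) =====
-- SPECIALS = "!@#%&()[]{}/?<>'"
--
--
-- def parse_keyword_DATE_line(current_date_line: str):
--     # single stateful pass: skip specials, collapse whitespace runs to one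
--     # space flushed only before a real character (so no leading/trailing space)
--     out = []
--     pending = False
--     for ch in current_date_line:
--         if ch in SPECIALS:
--             continue
--         if ch.isspace():
--             pending = True
--         else:
--             if out and pending:
--                 out.append(' ')
--             out.append(ch)
--             pending = False
--     return ''.join(out)
-- ===== Notes on version B (the rewrite author's own statement) =====
-- stated objective: alternative
-- what changed: Replaces A's two-stage pipeline (build a filtered copy of the string, then split it on whitespace and rejoin) with a single stateful pass over the input that keeps a pending-space flag and flushes at most one separator, only before a real character.
import Mathlib
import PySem

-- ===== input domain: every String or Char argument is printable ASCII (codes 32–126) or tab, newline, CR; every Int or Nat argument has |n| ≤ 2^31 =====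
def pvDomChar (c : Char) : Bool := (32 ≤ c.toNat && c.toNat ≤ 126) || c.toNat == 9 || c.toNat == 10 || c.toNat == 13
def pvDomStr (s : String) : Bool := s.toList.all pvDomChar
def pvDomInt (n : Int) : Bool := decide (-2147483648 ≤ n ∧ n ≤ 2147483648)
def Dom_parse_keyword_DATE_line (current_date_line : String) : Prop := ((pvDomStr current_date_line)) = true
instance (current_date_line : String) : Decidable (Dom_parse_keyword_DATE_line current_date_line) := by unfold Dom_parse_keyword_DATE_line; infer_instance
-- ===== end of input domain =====

-- B replaces A's filter-then-split/join pipeline by one stateful pass with a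
-- pending-space flag (objective: alternative decomposition, same cost).

-- ===== PORT A =====
def parse_keyword_DATE_line (current_date_line : String) : String :=
  let char_set : PySem.Set Char := PySem.Set.ofList "!@#%&()[]{}/?<>'".toList
  let output_string : List Char :=
    (PySem.List.pyRange 0 (PySem.Str.len current_date_line)).foldl
      (fun acc i =>
        if ¬ ((PySem.List.pyGetD current_date_line.toList i ' ') ∈ char_set)
        then acc ++ [PySem.List.pyGetD current_date_line.toList i ' '] else acc) []
  PySem.Str.join " " (PySem.Str.split₀ (String.ofList output_string))

-- ===== PORT B =====
def pvSpecials : List Char := "!@#%&()[]{}/?<>'".toList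

def pvBStep (st : List Char × Bool) (c : Char) : List Char × Bool :=
  if c ∈ pvSpecials then st
  else if PySem.Chars.isspace c then (st.1, true)
  else if st.1 ≠ [] ∧ st.2 = true then (st.1 ++ [' ', c], false)
  else (st.1 ++ [c], false)

def parse_keyword_DATE_line_alt (current_date_line : String) : String :=
  String.ofList (current_date_line.toList.foldl pvBStep ([], false)).1

-- ===== PRECONDITION & SPEC =====
def Spec_parse_keyword_DATE_line (current_date_line : String) (out : String) : Prop := out = parse_keyword_DATE_line_alt current_date_line
instance (current_date_line : String) (out : String) : Decidable (Spec_parse_keyword_DATE_line current_date_line out) := by unfold Spec_parse_keyword_DATE_line; infer_instance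

-- ===== CLAIM (what is proved, stated in full; the proofs are below) =====
def Claim_equal_parse_keyword_DATE_line : Prop := ∀ (current_date_line : String), Dom_parse_keyword_DATE_line current_date_line → Spec_parse_keyword_DATE_line current_date_line (parse_keyword_DATE_line current_date_line)

-- ===== LEMMAS AND PROOFS =====

def pvKeep (c : Char) : Bool := !decide (c ∈ pvSpecials)

lemma pv_foldl_filter (char_set : PySem.Set Char)
    (h : ∀ c, c ∈ char_set ↔ c ∈ pvSpecials) :
    ∀ (cs acc : List Char),
      cs.foldl (fun acc c => if ¬ (c ∈ char_set) then acc ++ [c] else acc) acc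
        = acc ++ cs.filter pvKeep := by
  intro cs
  induction cs with
  | nil => simp
  | cons c cs ih =>
    intro acc
    rw [List.foldl_cons]
    by_cases hc : c ∈ pvSpecials
    · rw [if_neg (not_not_intro ((h c).mpr hc)), ih,
        List.filter_cons_of_neg (p := pvKeep) (by simp [pvKeep, hc])]
    · rw [if_pos (fun hx => hc ((h c).mp hx)), ih,
        List.filter_cons_of_pos (p := pvKeep) (by simp [pvKeep, hc])]
      simp

lemma pv_join_app (l : List (List Char)) (w : List Char) :
    PySem.Chars.join [' '] (l ++ [w])
      = PySem.Chars.join [' '] l ++ (if l = [] then [] else [' ']) ++ w := by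
  induction l with
  | nil => simp [PySem.Chars.join_singleton, PySem.Chars.join_nil]
  | cons x l ih =>
    cases l with
    | nil => simp [PySem.Chars.join_cons_cons, PySem.Chars.join_singleton]
    | cons y rest =>
      have : (x :: (y :: rest)) ++ [w] = x :: ((y :: rest) ++ [w]) := rfl
      rw [this]
      have h2 : (y :: rest) ++ [w] = y :: (rest ++ [w]) := rfl
      rw [h2, PySem.Chars.join_cons_cons]
      rw [← h2, ih, PySem.Chars.join_cons_cons]
      simp

lemma pv_join_ne_nil (l : List (List Char)) (hl : l ≠ []) (hw : ∀ w ∈ l, w ≠ []) :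
    PySem.Chars.join [' '] l ≠ [] := by
  match l with
  | [w] =>
    rw [PySem.Chars.join_singleton]
    exact hw w (by simp)
  | w :: y :: rest =>
    rw [PySem.Chars.join_cons_cons]
    have : w ≠ [] := hw w (by simp)
    intro h
    simp only [List.append_assoc, List.append_eq_nil_iff] at h
    exact this h.1

lemma pv_key : ∀ (cs cur : List Char) (acc : List (List Char)) (out : List Char) (pending : Bool),
    (∀ w ∈ acc, w ≠ []) →
    out = PySem.Chars.join [' '] acc.reverse
            ++ (if acc = [] ∨ cur = [] then [] else [' ']) ++ cur.reverse →
    (pending = true → cur = []) →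
    (pending = false → cur ≠ [] ∨ acc = []) →
    PySem.Chars.join [' '] (PySem.Chars.split₀.go (cs.filter pvKeep) cur acc)
      = (cs.foldl pvBStep (out, pending)).1 := by
  intro cs
  induction cs with
  | nil =>
    intro cur acc out pending hacc hout _ _
    by_cases hcur : cur = []
    · subst hcur
      simp [PySem.Chars.split₀.go, hout]
    · rw [List.filter_nil, List.foldl_nil,
        show PySem.Chars.split₀.go [] cur acc = (cur.reverse :: acc).reverse by
          simp [PySem.Chars.split₀.go, hcur],
        show (cur.reverse :: acc).reverse = acc.reverse ++ [cur.reverse] by simp,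
        pv_join_app, hout]
      simp [hcur]
  | cons c cs ih =>
    intro cur acc out pending hacc hout hp3 hp4
    by_cases hc : c ∈ pvSpecials
    · -- special char: filtered out on the A side, skipped on the B side
      rw [List.filter_cons_of_neg (p := pvKeep) (by simp [pvKeep, hc]), List.foldl_cons,
        show pvBStep (out, pending) c = (out, pending) by simp [pvBStep, hc]]
      exact ih cur acc out pending hacc hout hp3 hp4
    · have hk : pvKeep c = true := by simp [pvKeep, hc]
      rw [List.filter_cons_of_pos hk, List.foldl_cons]
      by_cases hs : PySem.Chars.isspace c = true
      · -- whitespace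
        have hb : pvBStep (out, pending) c = (out, true) := by simp [pvBStep, hc, hs]
        rw [hb]
        by_cases hcur : cur = []
        · subst hcur
          rw [show PySem.Chars.split₀.go (c :: cs.filter pvKeep) [] acc
                = PySem.Chars.split₀.go (cs.filter pvKeep) [] acc by
              simp [PySem.Chars.split₀.go, hs]]
          exact ih [] acc out true hacc (by simpa using hout) (fun _ => rfl)
            (by intro h; exact absurd h (by simp))
        · rw [show PySem.Chars.split₀.go (c :: cs.filter pvKeep) cur acc
                = PySem.Chars.split₀.go (cs.filter pvKeep) [] (cur.reverse :: acc) by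
              simp [PySem.Chars.split₀.go, hs, hcur]]
          refine ih [] (cur.reverse :: acc) out true ?_ ?_ (fun _ => rfl)
            (by intro h; exact absurd h (by simp))
          · intro w hw
            rcases List.mem_cons.mp hw with hw | hw
            · subst hw; simpa using hcur
            · exact hacc w hw
          · rw [show (cur.reverse :: acc).reverse = acc.reverse ++ [cur.reverse] by simp,
              pv_join_app, hout]
            simp [hcur]
      · -- ordinary char
        have hgo : PySem.Chars.split₀.go (c :: cs.filter pvKeep) cur acc
            = PySem.Chars.split₀.go (cs.filter pvKeep) (c :: cur) acc := by
          simp [PySem.Chars.split₀.go, hs]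
        rw [hgo]
        have hstep : ∀ out', out' = PySem.Chars.join [' '] acc.reverse
              ++ (if acc = [] ∨ (c :: cur) = [] then [] else [' ']) ++ (c :: cur).reverse →
            PySem.Chars.join [' '] (PySem.Chars.split₀.go (cs.filter pvKeep) (c :: cur) acc)
              = (cs.foldl pvBStep (out', false)).1 := by
          intro out' hout'
          exact ih (c :: cur) acc out' false hacc hout' (by intro h; cases h)
            (fun _ => Or.inl (by simp))
        cases pending with
        | true =>
          have hcur : cur = [] := hp3 rfl
          subst hcur
          by_cases ha : acc = []
          · subst ha
            have hout0 : out = [] := by simpa [PySem.Chars.join_nil] using hout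
            have hb : pvBStep (out, true) c = (out ++ [c], false) := by
              simp [pvBStep, hc, hs, hout0]
            rw [hb]
            exact hstep (out ++ [c]) (by simp [hout0, PySem.Chars.join_nil])
          · have hone : out = PySem.Chars.join [' '] acc.reverse := by simpa using hout
            have hne : out ≠ [] := by
              rw [hone]
              exact pv_join_ne_nil _ (by simpa using ha) (by
                intro w hw; exact hacc w (List.mem_reverse.mp hw))
            have hb : pvBStep (out, true) c = (out ++ [' ', c], false) := by
              simp [pvBStep, hc, hs, hne]
            rw [hb]
            refine hstep (out ++ [' ', c]) ?_
            simp [hone, ha]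
        | false =>
          have hb : pvBStep (out, false) c = (out ++ [c], false) := by
            simp [pvBStep, hc, hs]
          rw [hb]
          rcases hp4 rfl with hcur | ha
          · refine hstep (out ++ [c]) ?_
            simp [hout, hcur]
          · subst ha
            rcases (by simpa using hout : out = cur.reverse) with hout'
            refine hstep (out ++ [c]) ?_
            simp [hout', PySem.Chars.join_nil]

lemma pv_loopA (s : String) :
    (PySem.List.pyRange 0 (PySem.Str.len s)).foldl
      (fun acc i =>
        if ¬ ((PySem.List.pyGetD s.toList i ' ') ∈ PySem.Set.ofList "!@#%&()[]{}/?<>'".toList)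
        then acc ++ [PySem.List.pyGetD s.toList i ' '] else acc) []
      = s.toList.filter pvKeep := by
  have hpg := PySem.List.foldl_pyRange_pyGetD s.toList ' '
    (fun acc c =>
      if ¬ (c ∈ PySem.Set.ofList "!@#%&()[]{}/?<>'".toList) then acc ++ [c] else acc)
    ([] : List Char) (a := 0) le_rfl
  simp only [Int.toNat_zero, List.drop_zero] at hpg
  exact hpg.trans (pv_foldl_filter _ (fun c => by rw [PySem.Set.mem_ofList]; rfl) s.toList [])

-- ===== VERDICT (by name: the statement is the Claim_ definition above) =====
theorem parse_keyword_DATE_line_spec : Claim_equal_parse_keyword_DATE_line := by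
  intro s _
  unfold Spec_parse_keyword_DATE_line parse_keyword_DATE_line parse_keyword_DATE_line_alt
  apply String.toList_inj.mp
  simp only [PySem.Str.toList_join, PySem.Str.split₀_map_toList, String.toList_ofList]
  exact (congrArg (fun L => PySem.Chars.join " ".toList (PySem.Chars.split₀ L))
      (pv_loopA s)).trans
    (pv_key s.toList [] [] [] false (by simp) (by simp [PySem.Chars.join_nil])
      (by intro h; cases h) (fun _ => Or.inr rfl))
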